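-- pv_equiv track=rewrite | github.com/daniel-reich/turbo-robot | WH8AfHodqyj4gSB8K_2.py | is_authentic_skewer
-- ===== SOURCE A (Python) =====
-- def is_authentic_skewer(s):
--   alpha= [chr(65+i) for i in range (26)]
--   vowels='AEIOUaeiou'
--   if '-' not in s or not any(c.isalpha() for c in s) or s[0] in vowels or s[-1] in vowels or not s[0].isalpha():
--     return False
--   consequtive=max_consequtive=0
--   for c in s:
--     if c=='-':
--       consequtive+=1
--       if consequtive > max_consequtive:
--         max_consequtive = consequtive
--     else:
--       consequtive =0
--   out=''.join(s.split('-'*max_consequtive))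
--   if not all(c.isalpha() for c in out) :
--     return False
--   for i in range (len(out)-1):
--     if out[i] in vowels:
--       if (out[i+1] in vowels):
--         return False
--     else:
--       if not (out[i+1] in vowels):
--         return False
--   return True
-- ===== SOURCE B (Python) =====
-- def is_authentic_skewer(s):
--     vowels = 'AEIOUaeiou'
--     if '-' not in s or not s[0].isalpha() or s[0] in vowels or s[-1] in vowels:
--         return False
--     runs, letters, cur = [], [], 0
--     for c in s:
--         if c == '-':
--             cur += 1
--         else:
--             if cur:
--                 runs.append(cur)
--                 cur = 0
--             letters.append(c)
--     if cur:
--         runs.append(cur)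
--     if any(r != runs[0] for r in runs):
--         return False
--     if not all(c.isalpha() for c in letters):
--         return False
--     return all((a in vowels) != (b in vowels) for a, b in zip(letters, letters[1:]))
-- ===== Notes on version B (the rewrite author's own statement) =====
-- stated objective: alternative
-- what changed: A finds the longest dash run, rebuilds the string via split/join on that run, then re-scans it; B makes one scan collecting dash-run lengths and letters, then checks all runs equal and the letters alphabetic and vowel/consonant-alternating.
import Mathlib
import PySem

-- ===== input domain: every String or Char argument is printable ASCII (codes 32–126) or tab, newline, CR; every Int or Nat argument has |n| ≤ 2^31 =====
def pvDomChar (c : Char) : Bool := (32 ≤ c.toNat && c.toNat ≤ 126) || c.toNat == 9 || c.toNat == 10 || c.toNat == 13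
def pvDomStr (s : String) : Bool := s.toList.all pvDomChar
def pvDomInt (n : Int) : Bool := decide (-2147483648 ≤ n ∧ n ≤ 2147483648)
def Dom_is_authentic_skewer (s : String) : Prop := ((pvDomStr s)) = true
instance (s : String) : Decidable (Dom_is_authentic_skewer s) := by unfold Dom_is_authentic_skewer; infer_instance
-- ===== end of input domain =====

-- B replaces A's build-max-run / split / join / rescan pipeline by one scan collecting dash-run
-- lengths and letters, then checks runs uniform and letters alternating (alternative decomposition, same cost).

-- shared literal: the string constant `vowels` both Pythons define
def pvVowels : List Char := "AEIOUaeiou".toList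

-- ===== PORT A =====
-- (A's `alpha` list is built and never used; omitted.)
-- the final index loop `for i in range(len(out)-1): …` as structural recursion on adjacent chars
def pvAltLoopA : List Char → Bool
  | a :: b :: rest =>
      if pvVowels.contains a then
        if pvVowels.contains b then false else pvAltLoopA (b :: rest)
      else
        if !(pvVowels.contains b) then false else pvAltLoopA (b :: rest)
  | _ => true

def is_authentic_skewer (s : String) : Bool :=
  let l := s.toList
  if !(PySem.Chars.isIn ['-'] l) || !(l.any PySem.Chars.isalpha)
      || (PySem.Chars.pyGet? l 0).elim false (fun c => pvVowels.contains c)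
      || (PySem.Chars.pyGet? l (-1)).elim false (fun c => pvVowels.contains c)
      || !((PySem.Chars.pyGet? l 0).elim false PySem.Chars.isalpha) then
    false
  else
    let m := (l.foldl (fun (p : Nat × Nat) c =>
        if c = '-' then
          (p.1 + 1, if p.1 + 1 > p.2 then p.1 + 1 else p.2)
        else (0, p.2)) (0, 0)).2
    let out := PySem.Chars.join [] (PySem.Chars.splitOn l (List.replicate m '-'))
    if !(out.all PySem.Chars.isalpha) then false
    else pvAltLoopA out

-- ===== PORT B =====
-- B's single forward scan: returns (dash-run lengths, letters) of the remaining input,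
-- `cur` the length of the dash run currently open
def pvScanB : List Char → Nat → List Nat × List Char
  | [], cur => (if cur > 0 then [cur] else [], [])
  | c :: rest, cur =>
      if c = '-' then pvScanB rest (cur + 1)
      else
        let p := pvScanB rest 0
        (if cur > 0 then cur :: p.1 else p.1, c :: p.2)

def is_authentic_skewer_alt (s : String) : Bool :=
  let l := s.toList
  if !(PySem.Chars.isIn ['-'] l)
      || !((PySem.Chars.pyGet? l 0).elim false PySem.Chars.isalpha)
      || (PySem.Chars.pyGet? l 0).elim false (fun c => pvVowels.contains c)
      || (PySem.Chars.pyGet? l (-1)).elim false (fun c => pvVowels.contains c) then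
    false
  else
    let p := pvScanB l 0
    let runs := p.1
    let letters := p.2
    if runs.any (fun r => r != runs.headD 0) then false
    else if !(letters.all PySem.Chars.isalpha) then false
    else (letters.zip letters.tail).all
        (fun q => pvVowels.contains q.1 != pvVowels.contains q.2)

-- ===== PRECONDITION & SPEC =====
def Spec_is_authentic_skewer (s : String) (out : Bool) : Prop := out = is_authentic_skewer_alt s
instance (s : String) (out : Bool) : Decidable (Spec_is_authentic_skewer s out) := by unfold Spec_is_authentic_skewer; infer_instance

-- ===== CLAIM (what is proved, stated in full; the proofs are below) =====
def Claim_equal_is_authentic_skewer : Prop := ∀ (s : String), Dom_is_authentic_skewer s → Spec_is_authentic_skewer s (is_authentic_skewer s)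

-- ===== LEMMAS AND PROOFS =====

-- greedy removal of every occurrence of (k+1) consecutive dashes, scanning left to right:
-- this is what `''.join(s.split('-'*(k+1)))` computes
def pvRG (k : Nat) : List Char → List Char
  | [] => []
  | c :: rest =>
      if (List.replicate (k + 1) '-').isPrefixOf (c :: rest) then
        pvRG k (rest.drop k)
      else c :: pvRG k rest
termination_by l => l.length
decreasing_by
  all_goals simp

def pvMaxL (xs : List Nat) : Nat := xs.foldr max 0

lemma pv_join_nil_flatten (parts : List (List Char)) : PySem.Chars.join [] parts = parts.flatten := by
  simp [PySem.Chars.join, List.intercalate]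
  induction parts with
  | nil => simp
  | cons x xs ih =>
    cases xs with
    | nil => simp
    | cons y ys => simpa using ih

lemma pv_go_join (k : Nat) : ∀ fuel l cur acc, l.length ≤ fuel →
    PySem.Chars.join [] (PySem.Chars.splitOn.go (List.replicate (k + 1) '-') fuel l cur acc)
      = (acc.reverse).flatten ++ cur.reverse ++ pvRG k l := by
  intro fuel
  induction fuel with
  | zero =>
    intro l cur acc h
    have : l = [] := List.eq_nil_of_length_eq_zero (Nat.le_zero.mp h)
    subst this
    simp [PySem.Chars.splitOn.go, pv_join_nil_flatten, pvRG]
  | succ f ih =>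
    intro l cur acc h
    cases l with
    | nil => simp [PySem.Chars.splitOn.go, pv_join_nil_flatten, pvRG]
    | cons c rest =>
      rw [PySem.Chars.splitOn.go]
      by_cases hp : (List.replicate (k + 1) '-').isPrefixOf (c :: rest)
      · simp only [hp, if_true]
        rw [ih _ _ _ (by simp at h ⊢; omega)]
        rw [pvRG]
        simp [hp]
      · rw [if_neg (by simp [hp])]
        rw [ih _ _ _ (by simp at h; omega)]
        rw [pvRG]
        simp [hp]



lemma pv_out_eq (k : Nat) (l : List Char) :
    PySem.Chars.join [] (PySem.Chars.splitOn l (List.replicate (k + 1) '-')) = pvRG k l := by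
  rw [PySem.Chars.splitOn, pv_go_join k _ _ _ _ (by omega)]
  simp

lemma pv_scan_replicate (j : Nat) : ∀ (t : List Char) (cur : Nat),
    pvScanB (List.replicate j '-' ++ t) cur = pvScanB t (cur + j) := by
  induction j with
  | zero => intro t cur; simp
  | succ n ih =>
    intro t cur
    rw [List.replicate_succ]
    simp only [List.cons_append, pvScanB, if_true, ih]
    ring_nf

lemma pv_scan_head (t : List Char) (cur : Nat) (h : 0 < cur)
    (ht : t = [] ∨ ∃ c rest, t = c :: rest ∧ c ≠ '-') :
    pvScanB t cur = (cur :: (pvScanB t 0).1, (pvScanB t 0).2) := by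
  rcases ht with rfl | ⟨c, rest, rfl, hc⟩
  · simp [pvScanB, h]
  · simp [pvScanB, hc, h]

lemma pv_runs_pos : ∀ (l : List Char) (cur : Nat), ∀ r ∈ (pvScanB l cur).1, 0 < r := by
  intro l
  induction l with
  | nil => intro cur r hr; simp [pvScanB] at hr; omega
  | cons c rest ih =>
    intro cur r hr
    by_cases hc : c = '-'
    · subst hc; simp only [pvScanB] at hr; exact ih _ _ hr
    · simp only [pvScanB, if_neg hc] at hr
      split at hr
      · rcases List.mem_cons.mp hr with rfl | hr
        · omega
        · exact ih _ _ hr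
      · exact ih _ _ hr

lemma pv_runs_ne : ∀ (l : List Char) (cur : Nat), '-' ∈ l ∨ 0 < cur → (pvScanB l cur).1 ≠ [] := by
  intro l
  induction l with
  | nil => intro cur h; simp at h; simp [pvScanB, h]
  | cons c rest ih =>
    intro cur h
    by_cases hc : c = '-'
    · subst hc; simp only [pvScanB]; exact ih _ (Or.inr (by omega))
    · simp only [pvScanB, if_neg hc]
      have : '-' ∈ rest ∨ 0 < cur := by
        rcases h with h | h
        · rcases List.mem_cons.mp h with h' | h'
          · exact absurd h'.symm hc
          · exact Or.inl h'
        · exact Or.inr h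
      rcases this with h' | h'
      · split <;> simp [ih _ (Or.inl h')]
      · simp [h']

lemma pv_le_maxL {xs : List Nat} {x : Nat} (h : x ∈ xs) : x ≤ pvMaxL xs := by
  induction xs with
  | nil => simp at h
  | cons a t ih =>
    rcases List.mem_cons.mp h with rfl | h'
    · simp [pvMaxL]
    · simp only [pvMaxL, List.foldr_cons]
      exact le_trans (ih h') (le_max_right _ _)

lemma pv_maxL_le {xs : List Nat} {n : Nat} (h : ∀ x ∈ xs, x ≤ n) : pvMaxL xs ≤ n := by
  induction xs with
  | nil => simp [pvMaxL]
  | cons a t ih =>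
    simp only [pvMaxL, List.foldr_cons, max_le_iff]
    exact ⟨h a (by simp), ih (fun x hx => h x (by simp [hx]))⟩

lemma pv_cur_le_maxL : ∀ (l : List Char) (cur : Nat), 0 < cur → cur ≤ pvMaxL (pvScanB l cur).1 := by
  intro l
  induction l with
  | nil => intro cur h; simp [pvScanB, h, pvMaxL]
  | cons c rest ih =>
    intro cur h
    by_cases hc : c = '-'
    · subst hc; simp only [pvScanB]
      exact le_trans (by omega) (ih (cur + 1) (by omega))
    · simp only [pvScanB, if_neg hc, h]
      simp [pvMaxL]

lemma pv_max_fold : ∀ (l : List Char) (cur mx : Nat), cur ≤ mx →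
    (l.foldl (fun (p : Nat × Nat) c =>
        if c = '-' then (p.1 + 1, if p.1 + 1 > p.2 then p.1 + 1 else p.2)
        else (0, p.2)) (cur, mx)).2 = mx ⊔ pvMaxL (pvScanB l cur).1 := by
  intro l
  induction l with
  | nil =>
    intro cur mx h
    by_cases hc : 0 < cur
    · simp [pvScanB, hc, pvMaxL]; omega
    · simp [pvScanB, hc, pvMaxL]
  | cons c rest ih =>
    intro cur mx h
    by_cases hc : c = '-'
    · subst hc
      simp only [List.foldl_cons, if_true, pvScanB]
      rw [ih (cur + 1) _ (by split <;> omega)]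
      have h1 : cur + 1 ≤ pvMaxL (pvScanB rest (cur + 1)).1 := pv_cur_le_maxL rest (cur + 1) (by omega)
      split <;> omega
    · simp only [List.foldl_cons, if_neg hc, pvScanB]
      rw [ih 0 mx (by omega)]
      by_cases hcur : 0 < cur
      · simp only [hcur, if_true]
        simp only [pvMaxL, List.foldr_cons]
        have : cur ≤ mx := h
        omega
      · have : cur = 0 := by omega
        subst this
        simp



lemma pv_altA_eq (l : List Char) :
    pvAltLoopA l = (l.zip l.tail).all (fun q => pvVowels.contains q.1 != pvVowels.contains q.2) := by
  induction l with
  | nil => simp [pvAltLoopA]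
  | cons a t ih =>
    cases t with
    | nil => simp [pvAltLoopA]
    | cons b rest =>
      rw [pvAltLoopA]
      simp only [List.contains_eq_mem] at ih
      simp only [List.tail_cons, List.zip_cons_cons, List.all_cons]
      by_cases hva : a ∈ pvVowels <;> by_cases hvb : b ∈ pvVowels <;>
        simp [hva, hvb, ih]

lemma pv_decomp : ∀ l : List Char, ∃ j t, l = List.replicate j '-' ++ t ∧
    (t = [] ∨ ∃ c r, t = c :: r ∧ c ≠ '-') := by
  intro l
  induction l with
  | nil => exact ⟨0, [], by simp, Or.inl rfl⟩
  | cons c rest ih =>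
    by_cases hc : c = '-'
    · obtain ⟨j, t, hl, ht⟩ := ih
      subst hc
      exact ⟨j + 1, t, by simp [List.replicate_succ, hl], ht⟩
    · exact ⟨0, c :: rest, by simp, Or.inr ⟨c, rest, rfl, hc⟩⟩

lemma pv_not_prefix (k j : Nat) (t : List Char) (hj : j < k + 1)
    (ht : t = [] ∨ ∃ c r, t = c :: r ∧ c ≠ '-') :
    ¬ (List.replicate (k + 1) '-').isPrefixOf (List.replicate j '-' ++ t) = true := by
  intro h
  rw [List.isPrefixOf_iff_prefix] at h
  rcases ht with rfl | ⟨c, r, rfl, hc⟩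
  · have := h.length_le; simp at this; omega
  · have h1 : (List.replicate j '-' ++ (c :: r))[j]? = (List.replicate (k+1) '-')[j]? := by
      obtain ⟨t2, h2⟩ := h
      rw [← h2, List.getElem?_append_left (by simp; omega)]
    rw [List.getElem?_append_right (by simp)] at h1
    simp [hj] at h1
    exact hc h1

lemma pv_rg_run (k : Nat) (t : List Char) :
    pvRG k (List.replicate (k + 1) '-' ++ t) = pvRG k t := by
  have hsh : List.replicate (k + 1) '-' ++ t = '-' :: (List.replicate k '-' ++ t) := by
    simp [List.replicate_succ]
  rw [hsh, pvRG]
  rw [if_pos (by rw [List.isPrefixOf_iff_prefix, ← hsh]; exact List.prefix_append _ _)]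
  rw [List.drop_append_of_le_length (by simp)]
  simp

lemma pv_rg_cons (k : Nat) (c : Char) (rest : List Char) (hc : c ≠ '-') :
    pvRG k (c :: rest) = c :: pvRG k rest := by
  rw [pvRG, if_neg]
  rw [List.replicate_succ, List.isPrefixOf_cons₂]
  simp [Ne.symm hc]

lemma pv_uniform_aux (k : Nat) : ∀ (n : Nat) (l : List Char), l.length ≤ n →
    (∀ r ∈ (pvScanB l 0).1, r = k + 1) → pvRG k l = (pvScanB l 0).2 := by
  intro n
  induction n with
  | zero =>
    intro l h _
    have : l = [] := List.eq_nil_of_length_eq_zero (by omega)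
    subst this; simp [pvRG, pvScanB]
  | succ n ih =>
    intro l hlen hruns
    cases hl : l with
    | nil => subst hl; simp [pvRG, pvScanB]
    | cons c rest =>
      subst hl
      by_cases hc : c = '-'
      · subst hc
        obtain ⟨j, t, hdec, ht⟩ := pv_decomp ('-' :: rest)
        have hj : 0 < j := by
          by_contra h0
          have hj0 : j = 0 := by omega
          subst hj0
          simp at hdec
          rcases ht with rfl | ⟨c', r', rfl, hc'⟩
          · simp at hdec
          · injection hdec with h1 _; exact hc' h1.symm
        rw [hdec] at hruns ⊢
        rw [pv_scan_replicate, Nat.zero_add, pv_scan_head t j hj ht] at hruns ⊢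
        have hjk : j = k + 1 := hruns j (by simp)
        subst hjk
        rw [pv_rg_run]
        have hlt : t.length ≤ n := by
          have h2 := congrArg List.length hdec
          simp only [List.length_cons, List.length_append, List.length_replicate] at h2
          simp only [List.length_cons] at hlen
          omega
        simp only []
        exact ih t hlt (fun r hr => hruns r (by simp [hr]))
      · rw [pv_rg_cons k c rest hc]
        have hscan : pvScanB (c :: rest) 0 = ((pvScanB rest 0).1, c :: (pvScanB rest 0).2) := by
          simp [pvScanB, hc]
        rw [hscan] at hruns ⊢
        simp only []
        rw [ih rest (by simp at hlen; omega) hruns]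

lemma pv_nonuniform_aux (k : Nat) : ∀ (n : Nat) (l : List Char), l.length ≤ n →
    (∀ r ∈ (pvScanB l 0).1, r ≤ k + 1) → (∃ r ∈ (pvScanB l 0).1, r ≠ k + 1) →
    '-' ∈ pvRG k l := by
  intro n
  induction n with
  | zero =>
    intro l h _ hex
    have : l = [] := List.eq_nil_of_length_eq_zero (by omega)
    subst this; simp [pvScanB] at hex
  | succ n ih =>
    intro l hlen hle hex
    cases hl : l with
    | nil => subst hl; simp [pvScanB] at hex
    | cons c rest =>
      subst hl
      by_cases hc : c = '-'
      · subst hc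
        obtain ⟨j, t, hdec, ht⟩ := pv_decomp ('-' :: rest)
        have hj : 0 < j := by
          by_contra h0
          have hj0 : j = 0 := by omega
          subst hj0
          simp at hdec
          rcases ht with rfl | ⟨c', r', rfl, hc'⟩
          · simp at hdec
          · injection hdec with h1 _; exact hc' h1.symm
        rw [hdec] at hle hex ⊢
        rw [pv_scan_replicate, Nat.zero_add, pv_scan_head t j hj ht] at hle hex
        by_cases hjk : j = k + 1
        · subst hjk
          rw [pv_rg_run]
          have hlt : t.length ≤ n := by
            have h2 := congrArg List.length hdec
            simp only [List.length_cons, List.length_append, List.length_replicate] at h2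
            simp only [List.length_cons] at hlen
            omega
          apply ih t hlt (fun r hr => hle r (by simp [hr]))
          obtain ⟨r, hr, hne⟩ := hex
          rcases List.mem_cons.mp hr with rfl | hr'
          · exact absurd rfl hne
          · exact ⟨r, hr', hne⟩
        · have hjlt : j < k + 1 := by
            have := hle j (by simp); omega
          obtain ⟨j', hj'⟩ : ∃ j', j = j' + 1 := ⟨j - 1, by omega⟩
          subst hj'
          rw [List.replicate_succ, List.cons_append, pvRG,
            if_neg (by simpa [List.replicate_succ] using pv_not_prefix k (j' + 1) t hjlt ht)]
          simp
      · have hscan : pvScanB (c :: rest) 0 = ((pvScanB rest 0).1, c :: (pvScanB rest 0).2) := by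
          simp [pvScanB, hc]
        rw [hscan] at hle hex
        rw [pv_rg_cons k c rest hc]
        exact List.mem_cons_of_mem _ (ih rest (by simp at hlen; omega) hle hex)

-- ===== VERDICT (by name: the statement is the Claim_ definition above) =====

lemma pv_main (l : List Char) (hm : '-' ∈ l) :
    (if !(PySem.Chars.join []
          (PySem.Chars.splitOn l
            (List.replicate
              ((l.foldl (fun (p : Nat × Nat) c =>
                  if c = '-' then (p.1 + 1, if p.1 + 1 > p.2 then p.1 + 1 else p.2)
                  else (0, p.2)) (0, 0)).2) '-'))).all PySem.Chars.isalpha then false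
      else pvAltLoopA (PySem.Chars.join []
          (PySem.Chars.splitOn l
            (List.replicate
              ((l.foldl (fun (p : Nat × Nat) c =>
                  if c = '-' then (p.1 + 1, if p.1 + 1 > p.2 then p.1 + 1 else p.2)
                  else (0, p.2)) (0, 0)).2) '-'))))
    = (if (pvScanB l 0).1.any (fun r => r != (pvScanB l 0).1.headD 0) then false
       else if !((pvScanB l 0).2.all PySem.Chars.isalpha) then false
       else ((pvScanB l 0).2.zip (pvScanB l 0).2.tail).all
          (fun q => pvVowels.contains q.1 != pvVowels.contains q.2)) := by
  have hmfold : (l.foldl (fun (p : Nat × Nat) c =>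
      if c = '-' then (p.1 + 1, if p.1 + 1 > p.2 then p.1 + 1 else p.2)
      else (0, p.2)) (0, 0)).2 = pvMaxL (pvScanB l 0).1 := by
    simpa using pv_max_fold l 0 0 le_rfl
  have hne := pv_runs_ne l 0 (Or.inl hm)
  rcases hruns : (pvScanB l 0).1 with _ | ⟨r0, rs⟩
  · exact absurd hruns hne
  have hr0pos : 0 < r0 := pv_runs_pos l 0 r0 (by rw [hruns]; exact List.mem_cons_self)
  by_cases huni : ∀ r ∈ (pvScanB l 0).1, r = r0
  · -- uniform runs: A's out is exactly the letters
    have hmax : pvMaxL (pvScanB l 0).1 = r0 := by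
      rw [hruns]
      have h1 : pvMaxL rs ≤ r0 :=
        pv_maxL_le (fun x hx => le_of_eq (huni x (by rw [hruns]; exact List.mem_cons_of_mem _ hx)))
      simp only [pvMaxL, List.foldr_cons] at h1 ⊢
      omega
    obtain ⟨k, hk⟩ : ∃ k, r0 = k + 1 := ⟨r0 - 1, by omega⟩
    have hout : PySem.Chars.join []
        (PySem.Chars.splitOn l (List.replicate ((l.foldl (fun (p : Nat × Nat) c =>
          if c = '-' then (p.1 + 1, if p.1 + 1 > p.2 then p.1 + 1 else p.2)
          else (0, p.2)) (0, 0)).2) '-')) = (pvScanB l 0).2 := by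
      rw [hmfold, hmax, hk, pv_out_eq]
      exact pv_uniform_aux k l.length l le_rfl (fun r hr => (huni r hr).trans hk)
    have hany : ((r0 :: rs).any fun r => r != (r0 :: rs).headD 0) = false := by
      simp only [List.headD_cons, List.any_eq_false]
      intro r hr
      simp [huni r (by rw [hruns]; exact hr)]
    rw [hout, hany]
    simp only [Bool.false_eq_true, if_false]
    by_cases hall : (pvScanB l 0).2.all PySem.Chars.isalpha <;>
      simp [hall, pv_altA_eq]
  · -- some run differs from the first: both sides reject
    have hex0 : ∃ r ∈ (pvScanB l 0).1, r ≠ r0 := by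
      push Not at huni; exact huni
    have hle : ∀ r ∈ (pvScanB l 0).1, r ≤ pvMaxL (pvScanB l 0).1 := fun r hr => pv_le_maxL hr
    have hpos : 0 < pvMaxL (pvScanB l 0).1 :=
      lt_of_lt_of_le hr0pos (pv_le_maxL (by rw [hruns]; exact List.mem_cons_self))
    obtain ⟨k, hk⟩ : ∃ k, pvMaxL (pvScanB l 0).1 = k + 1 :=
      ⟨pvMaxL (pvScanB l 0).1 - 1, by omega⟩
    have hex : ∃ r ∈ (pvScanB l 0).1, r ≠ k + 1 := by
      obtain ⟨r, hr, hner⟩ := hex0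
      by_cases h0 : r0 = k + 1
      · exact ⟨r, hr, by rw [← h0]; exact hner⟩
      · exact ⟨r0, by rw [hruns]; exact List.mem_cons_self, h0⟩
    have hdash : '-' ∈ PySem.Chars.join []
        (PySem.Chars.splitOn l (List.replicate ((l.foldl (fun (p : Nat × Nat) c =>
          if c = '-' then (p.1 + 1, if p.1 + 1 > p.2 then p.1 + 1 else p.2)
          else (0, p.2)) (0, 0)).2) '-')) := by
      rw [hmfold, hk, pv_out_eq]
      exact pv_nonuniform_aux k l.length l le_rfl (fun r hr => hk ▸ hle r hr) hex
    have hallf : (PySem.Chars.join []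
        (PySem.Chars.splitOn l (List.replicate ((l.foldl (fun (p : Nat × Nat) c =>
          if c = '-' then (p.1 + 1, if p.1 + 1 > p.2 then p.1 + 1 else p.2)
          else (0, p.2)) (0, 0)).2) '-'))).all PySem.Chars.isalpha = false := by
      rw [List.all_eq_false]
      exact ⟨'-', hdash, by decide⟩
    have hany : ((r0 :: rs).any fun r => r != (r0 :: rs).headD 0) = true := by
      obtain ⟨r, hr, hner⟩ := hex0
      rw [hruns] at hr
      simp only [List.headD_cons, List.any_eq_true]
      exact ⟨r, hr, by simpa using hner⟩
    rw [hallf, hany]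
    simp

theorem is_authentic_skewer_spec : Claim_equal_is_authentic_skewer := by
  intro s _
  unfold Spec_is_authentic_skewer is_authentic_skewer is_authentic_skewer_alt
  simp only []
  by_cases hin : PySem.Chars.isIn ['-'] s.toList
  · have hmem : '-' ∈ s.toList :=
      ((PySem.Chars.isIn_iff_infix _ _).mp hin).subset (by simp)
    obtain ⟨a, t, hat⟩ : ∃ a t, s.toList = a :: t := by
      cases h : s.toList with
      | nil => rw [h] at hmem; simp at hmem
      | cons a t => exact ⟨a, t, rfl⟩
    have hget0 : PySem.Chars.pyGet? s.toList 0 = some a := by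
      rw [hat]; simp [PySem.Chars.pyGet?, PySem.List.pyGet?, PySem.List.pyIdx?]
    by_cases halpha0 : PySem.Chars.isalpha a
    · have hany : s.toList.any PySem.Chars.isalpha = true :=
        List.any_eq_true.mpr ⟨a, by rw [hat]; exact List.mem_cons_self, halpha0⟩
      rw [hget0]
      simp only [hin, hany, halpha0, Option.elim_some, Bool.not_true, Bool.false_or,
        Bool.or_false]
      by_cases hg : (pvVowels.contains a
          || (PySem.Chars.pyGet? s.toList (-1)).elim false fun c => pvVowels.contains c) = true
      · rw [if_pos hg, if_pos hg]
      · rw [if_neg hg, if_neg hg]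
        exact pv_main s.toList hmem
    · rw [hget0]
      simp [halpha0]
  · simp [hin]
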